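-- pv_equiv track=rewrite | github.com/augannandev/economic-modeling-agent | my-app/python-service/km_extractor.py | _match_group_to_curve
-- ===== SOURCE A (Python) =====
-- from typing import Dict, List, Optional, Tuple, Any
--
-- def _match_group_to_curve(group_name: str, group_color: str, curve_names: List[str], curve_colors: List[str]) -> str:
--     """Match risk table group to extracted curve by name or color"""
--     group_name_lower = group_name.lower()
--     group_color_lower = group_color.lower()
--
--     # First try exact name match
--     for name in curve_names:
--         if name.lower() == group_name_lower:
--             return name
--
--     # Try partial name match
--     for name in curve_names:
--         if group_name_lower in name.lower() or name.lower() in group_name_lower: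
--             return name
--
--     # Try color match
--     for i, color in enumerate(curve_colors):
--         if color.lower() == group_color_lower:
--             if i < len(curve_names):
--                 return curve_names[i]
--
--     # Fallback to group name
--     return group_name
-- ===== SOURCE B (Python) =====
-- from typing import List
--
-- def _match_group_to_curve(group_name: str, group_color: str, curve_names: List[str], curve_colors: List[str]) -> str:
--     """Single pass over the curves, recording the earliest candidate of each
--     precedence class (exact name, partial name, colour), then pick by precedence."""
--     group_name_lower = group_name.lower()
--     group_color_lower = group_color.lower()
--     exact = None
--     partial = None
--     by_color = None
--     for i, name in enumerate(curve_names):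
--         name_lower = name.lower()
--         if exact is None and name_lower == group_name_lower:
--             exact = name
--         if partial is None and (group_name_lower in name_lower or name_lower in group_name_lower):
--             partial = name
--         if by_color is None and i < len(curve_colors) and curve_colors[i].lower() == group_color_lower:
--             by_color = name
--     if exact is not None:
--         return exact
--     if partial is not None:
--         return partial
--     if by_color is not None:
--         return by_color
--     return group_name
-- ===== Notes on version B (the rewrite author's own statement) =====
-- stated objective: alternative
-- what changed: Replaces A's three sequential scans (exact name, partial name, colour with index lookup into names) by a single pass over enumerate(curve_names) that records the earliest candidate of each precedence class and picks exact > partial > colour afterwards.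
import Mathlib
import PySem

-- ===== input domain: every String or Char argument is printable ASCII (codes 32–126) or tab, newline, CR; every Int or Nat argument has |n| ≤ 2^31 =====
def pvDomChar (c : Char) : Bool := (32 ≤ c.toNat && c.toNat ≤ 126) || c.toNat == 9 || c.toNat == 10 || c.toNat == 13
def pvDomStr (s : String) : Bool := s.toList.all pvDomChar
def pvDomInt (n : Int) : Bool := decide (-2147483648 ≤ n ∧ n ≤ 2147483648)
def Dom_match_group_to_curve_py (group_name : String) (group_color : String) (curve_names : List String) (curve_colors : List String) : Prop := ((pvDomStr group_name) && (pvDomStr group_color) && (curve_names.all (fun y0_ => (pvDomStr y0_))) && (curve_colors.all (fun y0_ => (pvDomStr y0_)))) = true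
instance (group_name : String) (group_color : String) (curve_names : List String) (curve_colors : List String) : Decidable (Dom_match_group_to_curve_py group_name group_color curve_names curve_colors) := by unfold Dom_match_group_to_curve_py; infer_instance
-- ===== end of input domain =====

-- B replaces A's three sequential scans by one pass over enumerate(curve_names) keeping the
-- earliest exact / partial / colour candidate; same results, a different decomposition.

-- ===== PORT A =====
-- A's first loop: return the first name whose lower() equals group_name_lower
def pvAExact (g : String) : List String → Option String
  | [] => none
  | n :: rest => if PySem.Str.lower n = g then some n else pvAExact g rest

-- A's second loop: first name with a mutual-substring relation to group_name_lower
def pvAPartial (g : String) : List String → Option String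
  | [] => none
  | n :: rest =>
      if (PySem.Str.isIn g (PySem.Str.lower n) || PySem.Str.isIn (PySem.Str.lower n) g) = true then some n
      else pvAPartial g rest

-- A's third loop: for i, color in enumerate(curve_colors): on colour match return names[i] if i < len(names)
def pvAColor (gc : String) (names : List String) : List (Int × String) → Option String
  | [] => none
  | (i, color) :: rest =>
      if PySem.Str.lower color = gc then
        if i < (names.length : Int) then PySem.List.pyGet? names i
        else pvAColor gc names rest
      else pvAColor gc names rest

def match_group_to_curve_py (group_name : String) (group_color : String) (curve_names : List String) (curve_colors : List String) : String :=
  match pvAExact (PySem.Str.lower group_name) curve_names with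
  | some n => n
  | none =>
    match pvAPartial (PySem.Str.lower group_name) curve_names with
    | some n => n
    | none =>
      match pvAColor (PySem.Str.lower group_color) curve_names (PySem.List.enumerate curve_colors 0) with
      | some n => n
      | none => group_name

-- ===== PORT B =====
-- loop body of Source B: update the three candidate holders for one (i, name)
def pvBStep (gnl gcl : String) (colors : List String)
    (st : Option String × Option String × Option String) (p : Int × String) :
    Option String × Option String × Option String :=
  ((if st.1 = none ∧ PySem.Str.lower p.2 = gnl then some p.2 else st.1),
   (if st.2.1 = none ∧ (PySem.Str.isIn gnl (PySem.Str.lower p.2) || PySem.Str.isIn (PySem.Str.lower p.2) gnl) = true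
    then some p.2 else st.2.1),
   (if st.2.2 = none ∧ p.1 < (colors.length : Int) ∧
         (PySem.List.pyGet? colors p.1).map PySem.Str.lower = some gcl
    then some p.2 else st.2.2))

def match_group_to_curve_py_alt (group_name : String) (group_color : String) (curve_names : List String) (curve_colors : List String) : String :=
  match (PySem.List.enumerate curve_names 0).foldl
      (pvBStep (PySem.Str.lower group_name) (PySem.Str.lower group_color) curve_colors)
      (none, none, none) with
  | (some n, _, _) => n
  | (none, some n, _) => n
  | (none, none, some n) => n
  | (none, none, none) => group_name

-- ===== PRECONDITION & SPEC =====
def Spec_match_group_to_curve_py (group_name : String) (group_color : String) (curve_names : List String) (curve_colors : List String) (out : String) : Prop := out = match_group_to_curve_py_alt group_name group_color curve_names curve_colors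
instance (group_name : String) (group_color : String) (curve_names : List String) (curve_colors : List String) (out : String) : Decidable (Spec_match_group_to_curve_py group_name group_color curve_names curve_colors out) := by unfold Spec_match_group_to_curve_py; infer_instance

-- ===== CLAIM (what is proved, stated in full; the proofs are below) =====
def Claim_equal_match_group_to_curve_py : Prop := ∀ (group_name : String) (group_color : String) (curve_names : List String) (curve_colors : List String), Dom_match_group_to_curve_py group_name group_color curve_names curve_colors → Spec_match_group_to_curve_py group_name group_color curve_names curve_colors (match_group_to_curve_py group_name group_color curve_names curve_colors)

-- ===== LEMMAS AND PROOFS =====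

-- first colour-matching pair of a names/colours zip (common semantics of both colour scans)
def pvFM (gc : String) : List (String × String) → Option String
  | [] => none
  | (n, c) :: rest => if PySem.Str.lower c = gc then some n else pvFM gc rest

-- B's colour component, as a scan over names with a running index into colors
def pvBColor (gc : String) (colors : List String) : Nat → List String → Option String
  | _, [] => none
  | k, n :: rest =>
      if (k : Int) < (colors.length : Int) ∧
         (PySem.List.pyGet? colors (k : Int)).map PySem.Str.lower = some gc
      then some n else pvBColor gc colors (k + 1) rest

lemma pvAColor_eq_fm (gc : String) (colors : List String) :
    ∀ (k : Nat) (names : List String),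
      pvAColor gc names (PySem.List.enumerate colors (k : Int)) =
        pvFM gc ((names.drop k).zip colors) := by
  induction colors with
  | nil => intro k names; simp [PySem.List.enumerate_nil, pvAColor, pvFM]
  | cons c rest ih =>
    intro k names
    rw [PySem.List.enumerate_cons, pvAColor]
    have hcast : ((k : Int) + 1) = ((k + 1 : Nat) : Int) := by push_cast; ring
    rw [hcast]
    by_cases hd : k < names.length
    · have hdrop : names.drop k = names[k] :: names.drop (k + 1) :=
        List.drop_eq_getElem_cons hd
      have hklt : ((k : Int) < (names.length : Int)) := by exact_mod_cast hd
      have hget : PySem.List.pyGet? names (k : Int) = some names[k] := by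
        rw [PySem.List.pyGet?_natCast, List.getElem?_eq_getElem hd]
      rw [hdrop, List.zip_cons_cons, pvFM]
      by_cases hc : PySem.Str.lower c = gc
      · rw [if_pos hc, if_pos hc, if_pos hklt, hget]
      · rw [if_neg hc, if_neg hc, ih]
    · have hdrop : names.drop k = [] := List.drop_eq_nil_of_le (by omega)
      have hdrop' : names.drop (k + 1) = [] := List.drop_eq_nil_of_le (by omega)
      have hklt : ¬ ((k : Int) < (names.length : Int)) := by exact_mod_cast hd
      rw [hdrop, List.zip_nil_left]
      by_cases hc : PySem.Str.lower c = gc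
      · rw [if_pos hc, if_neg hklt, ih, hdrop', List.zip_nil_left]
      · rw [if_neg hc, ih, hdrop', List.zip_nil_left]

lemma pvBColor_eq_fm (gc : String) (colors : List String) :
    ∀ (names : List String) (k : Nat),
      pvBColor gc colors k names = pvFM gc (names.zip (colors.drop k)) := by
  intro names
  induction names with
  | nil => intro k; simp [pvBColor, pvFM]
  | cons n rest ih =>
    intro k
    rw [pvBColor]
    by_cases hk : k < colors.length
    · have hdrop : colors.drop k = colors[k] :: colors.drop (k + 1) :=
        List.drop_eq_getElem_cons hk
      have hget : PySem.List.pyGet? colors (k : Int) = some colors[k] := by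
        rw [PySem.List.pyGet?_natCast, List.getElem?_eq_getElem hk]
      have hklt : ((k : Int) < (colors.length : Int)) := by exact_mod_cast hk
      rw [hdrop, List.zip_cons_cons, pvFM, hget]
      by_cases hc : PySem.Str.lower colors[k] = gc
      · rw [if_pos ⟨hklt, by rw [Option.map_some, hc]⟩, if_pos hc]
      · rw [if_neg (fun h => hc (by simpa using h.2)), if_neg hc, ih]
    · have hdrop : colors.drop k = [] := List.drop_eq_nil_of_le (by omega)
      have hdrop' : colors.drop (k + 1) = [] := List.drop_eq_nil_of_le (by omega)
      have hklt : ¬ ((k : Int) < (colors.length : Int)) := by exact_mod_cast hk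
      rw [if_neg (fun h => hklt h.1), ih, hdrop, hdrop', List.zip_nil_right, List.zip_nil_right]

-- the single fold of B computes, componentwise, "already-found value, else the scan of the rest"
lemma pvFold_spec (gnl gcl : String) (colors : List String) :
    ∀ (names : List String) (k : Nat) (st : Option String × Option String × Option String),
      (PySem.List.enumerate names (k : Int)).foldl (pvBStep gnl gcl colors) st =
        ((match st.1 with | some v => some v | none => pvAExact gnl names),
         (match st.2.1 with | some v => some v | none => pvAPartial gnl names),
         (match st.2.2 with | some v => some v | none => pvBColor gcl colors k names)) := by
  intro names
  induction names with
  | nil =>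
    intro k st
    simp only [PySem.List.enumerate_nil, List.foldl_nil, pvAExact, pvAPartial, pvBColor]
    rcases st with ⟨e, p, c⟩
    cases e <;> cases p <;> cases c <;> rfl
  | cons n rest ih =>
    intro k st
    rw [PySem.List.enumerate_cons, List.foldl_cons]
    have hcast : ((k : Int) + 1) = ((k + 1 : Nat) : Int) := by push_cast; ring
    rw [hcast, ih]
    rcases st with ⟨e, p, c⟩
    simp only [pvBStep, Prod.mk.injEq]
    refine ⟨?_, ?_, ?_⟩
    · cases e with
      | some v => simp
      | none =>
        rw [pvAExact]
        simp only [true_and]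
        split_ifs <;> rfl
    · cases p with
      | some v => simp
      | none =>
        rw [pvAPartial]
        simp only [true_and]
        split_ifs <;> rfl
    · cases c with
      | some v => simp
      | none =>
        rw [pvBColor]
        simp only [true_and]
        split_ifs <;> rfl

-- ===== VERDICT (by name: the statement is the Claim_ definition above) =====
theorem match_group_to_curve_py_spec : Claim_equal_match_group_to_curve_py := by
  intro gn gc names colors _
  unfold Spec_match_group_to_curve_py match_group_to_curve_py match_group_to_curve_py_alt
  have hfold := pvFold_spec (PySem.Str.lower gn) (PySem.Str.lower gc) colors names 0 (none, none, none)
  rw [Nat.cast_zero] at hfold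
  rw [hfold]
  have hcolor : pvBColor (PySem.Str.lower gc) colors 0 names =
      pvAColor (PySem.Str.lower gc) names (PySem.List.enumerate colors 0) := by
    have h1 := pvAColor_eq_fm (PySem.Str.lower gc) colors 0 names
    have h2 := pvBColor_eq_fm (PySem.Str.lower gc) colors names 0
    rw [Nat.cast_zero] at h1
    rw [List.drop_zero] at h1 h2
    rw [h1, h2]
  rw [hcolor]
  rcases he : pvAExact (PySem.Str.lower gn) names with _ | n <;>
    rcases hp : pvAPartial (PySem.Str.lower gn) names with _ | m <;>
      rcases hc : pvAColor (PySem.Str.lower gc) names (PySem.List.enumerate colors 0) with _ | c <;>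
        rfl
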